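-- pv_equiv track=rewrite | github.com/MurakamiHonami/my_first_repository | test/solo_mahjong_1.py | kotsu_cnt
-- ===== SOURCE A (Python) =====
-- def kotsu_cnt(tehai):
--     kotsu=0
--     j=0
--     while j<len(tehai)-2:
--         if tehai[j]==tehai[j+1] and tehai[j+1]==tehai[j+2]:
--             kotsu+=1
--             tehai.remove(tehai[j+2])
--             tehai.remove(tehai[j+1])
--             tehai.remove(tehai[j])
--             j=0
--         else:
--             j+=1
--     return kotsu,tehai
-- ===== SOURCE B (Python) =====
-- # B: round loop — find the leftmost run of three equal consecutive tiles with one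
-- # zip-scan, then delete the first three occurrences of its value in a single
-- # counting filter pass (A rescans from index 0 with three list.remove calls).
-- # Like A, mutates tehai in place and returns the same list object.
-- def kotsu_cnt(tehai):
--     def first_run(t):
--         for a, b, c in zip(t, t[1:], t[2:]):
--             if a == b == c:
--                 return a
--         return None
--
--     count = 0
--     t = tehai[:]
--     while True:
--         v = first_run(t)
--         if v is None:
--             break
--         count += 1
--         need = 3
--         kept = []
--         for x in t:
--             if need and x == v:
--                 need -= 1
--             else:
--                 kept.append(x)
--         t = kept
--     tehai[:] = t
--     return count, tehai
-- ===== Notes on version B (the rewrite author's own statement) =====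
-- stated objective: alternative
-- what changed: B replaces A's index-resetting while loop with three list.remove calls by a round loop that finds the leftmost run of three equal consecutive tiles with one zip-scan and deletes the first three occurrences of its value in a single counting filter pass.
import Mathlib
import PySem

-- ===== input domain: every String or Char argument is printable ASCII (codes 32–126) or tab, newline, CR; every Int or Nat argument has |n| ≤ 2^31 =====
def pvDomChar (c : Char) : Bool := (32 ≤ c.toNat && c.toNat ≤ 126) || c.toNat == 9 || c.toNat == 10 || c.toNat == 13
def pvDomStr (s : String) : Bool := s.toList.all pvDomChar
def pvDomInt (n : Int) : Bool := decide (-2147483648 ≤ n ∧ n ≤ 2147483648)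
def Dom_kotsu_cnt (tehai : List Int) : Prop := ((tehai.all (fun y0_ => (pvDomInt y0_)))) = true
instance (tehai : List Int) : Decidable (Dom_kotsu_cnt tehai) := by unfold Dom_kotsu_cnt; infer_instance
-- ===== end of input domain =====

-- B finds the leftmost run of three equal consecutive tiles once per round and deletes the
-- first three occurrences of its value in one counting filter pass, instead of A's
-- index-resetting scan with three list.remove calls (objective: alternative). Both Pythons
-- mutate tehai in place; the equivalence proved here is about the return value.

-- ===== PORT A =====
-- 'tehai.remove(x)': x is always present at the call sites (the branch guard ensures it),
-- so remove? is some there and the getD default is unreachable.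
def pyRemove (t : List Int) (v : Int) : List Int := (PySem.List.remove? t v).getD t

-- cited by kotsuLoopA's decreasing_by
theorem pyRemove_eq_erase (t : List Int) (v : Int) : pyRemove t v = t.erase v := by
  unfold pyRemove
  by_cases h : v ∈ t
  · rw [PySem.List.remove?_eq_some_erase t v h]; rfl
  · rw [(PySem.List.remove?_eq_none_iff t v).mpr h, List.erase_of_not_mem h]; rfl

theorem pyRemove_length_le (t : List Int) (v : Int) : (pyRemove t v).length ≤ t.length := by
  rw [pyRemove_eq_erase]; exact List.length_erase_le

theorem pyRemove_length_lt (t : List Int) (v : Int) (h : v ∈ t) :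
    (pyRemove t v).length < t.length := by
  rw [pyRemove_eq_erase, List.length_erase_of_mem h]
  have : t ≠ [] := by rintro rfl; simp at h
  have : t.length ≠ 0 := by simpa [List.length_eq_zero_iff]
  omega

theorem getD_mem_of_lt (t : List Int) (i : Nat) (h : i < t.length) : t.getD i 0 ∈ t := by
  rw [List.getD_eq_getElem t 0 h]; exact List.getElem_mem h

-- the while loop of A: state (kotsu, j, tehai); the getD indices are guarded by h, so getD is exact
def kotsuLoopA (kotsu : Int) (j : Nat) (tehai : List Int) : Int × List Int :=
  if h : j + 2 < tehai.length then
    if tehai.getD j 0 = tehai.getD (j+1) 0 ∧ tehai.getD (j+1) 0 = tehai.getD (j+2) 0 then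
      let t1 := pyRemove tehai (tehai.getD (j+2) 0)
      let t2 := pyRemove t1 (t1.getD (j+1) 0)
      let t3 := pyRemove t2 (t2.getD j 0)
      kotsuLoopA (kotsu + 1) 0 t3
    else
      kotsuLoopA kotsu (j+1) tehai
  else
    (kotsu, tehai)
termination_by (tehai.length, tehai.length - j)
decreasing_by
  · apply Prod.Lex.left
    exact lt_of_le_of_lt (le_trans (pyRemove_length_le _ _) (pyRemove_length_le _ _))
      (pyRemove_length_lt _ _ (getD_mem_of_lt _ _ h))
  · apply Prod.Lex.right
    omega

def kotsu_cnt (tehai : List Int) : Int × List Int := kotsuLoopA 0 0 tehai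

-- ===== PORT B =====
-- first_run: one scan over the consecutive triples, value of the leftmost run
def firstRun : List Int → Option Int
  | a :: b :: c :: rest => if a = b ∧ b = c then some a else firstRun (b :: c :: rest)
  | _ => none

-- the counting filter: drop the first 'need' occurrences of v
def dropThree (v : Int) : Nat → List Int → List Int
  | _, [] => []
  | need, x :: xs => if need ≠ 0 ∧ x = v then dropThree v (need - 1) xs else x :: dropThree v need xs

-- cited by kotsuLoopB's decreasing_by
theorem mem_of_firstRun (t : List Int) (v : Int) (h : firstRun t = some v) : v ∈ t := by
  induction t with
  | nil => simp [firstRun] at h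
  | cons x xs ih =>
    match xs with
    | [] => simp [firstRun] at h
    | [b] => simp [firstRun] at h
    | b :: c :: rest =>
      rw [firstRun] at h
      by_cases hab : x = b ∧ b = c
      · rw [if_pos hab] at h
        injection h with h
        subst h; exact List.mem_cons_self
      · rw [if_neg hab] at h
        exact List.mem_cons_of_mem _ (ih h)

theorem dropThree_length_le (v : Int) (n : Nat) (t : List Int) :
    (dropThree v n t).length ≤ t.length := by
  induction t generalizing n with
  | nil => simp [dropThree]
  | cons x xs ih =>
    rw [dropThree]
    split
    · exact le_trans (ih _) (by simp)
    · simpa using ih n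

theorem dropThree_length_lt (v : Int) (n : Nat) (t : List Int) (h : v ∈ t) :
    (dropThree v (n+1) t).length < t.length := by
  induction t generalizing n with
  | nil => simp at h
  | cons x xs ih =>
    by_cases hx : x = v
    · rw [dropThree, if_pos ⟨Nat.succ_ne_zero n, hx⟩]
      exact Nat.lt_succ_of_le (by simpa using dropThree_length_le v n xs)
    · have hmem : v ∈ xs := by
        rcases List.mem_cons.mp h with h' | h'
        · exact absurd h'.symm hx
        · exact h'
      rw [dropThree, if_neg (by tauto)]
      simpa using ih n hmem

-- the round loop of B
def kotsuLoopB (count : Int) (t : List Int) : Int × List Int :=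
  match hv : firstRun t with
  | none => (count, t)
  | some v => kotsuLoopB (count + 1) (dropThree v 3 t)
termination_by t.length
decreasing_by exact dropThree_length_lt _ 2 _ (mem_of_firstRun _ _ hv)

def kotsu_cnt_alt (tehai : List Int) : Int × List Int := kotsuLoopB 0 tehai

-- ===== PRECONDITION & SPEC =====
def Spec_kotsu_cnt (tehai : List Int) (out : Int × List Int) : Prop := out = kotsu_cnt_alt tehai
instance (tehai : List Int) (out : Int × List Int) : Decidable (Spec_kotsu_cnt tehai out) := by unfold Spec_kotsu_cnt; infer_instance

-- ===== CLAIM (what is proved, stated in full; the proofs are below) =====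
def Claim_equal_kotsu_cnt : Prop := ∀ (tehai : List Int), Dom_kotsu_cnt tehai → Spec_kotsu_cnt tehai (kotsu_cnt tehai)

-- ===== LEMMAS AND PROOFS =====

-- a run of three equal consecutive entries at index i
def Triple (t : List Int) (i : Nat) : Prop :=
  i + 2 < t.length ∧ t.getD i 0 = t.getD (i+1) 0 ∧ t.getD (i+1) 0 = t.getD (i+2) 0

theorem triple_cons (x : Int) (t : List Int) (i : Nat) : Triple (x :: t) (i+1) ↔ Triple t i := by
  simp only [Triple, List.length_cons, List.getD_cons_succ]
  exact and_congr (by omega) Iff.rfl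

theorem firstRun_none (t : List Int) (h : ∀ i, ¬ Triple t i) : firstRun t = none := by
  induction t with
  | nil => rfl
  | cons x xs ih =>
    match xs with
    | [] => rfl
    | [b] => rfl
    | b :: c :: rest =>
      rw [firstRun, if_neg]
      · exact ih (fun i => by have := h (i+1); rwa [triple_cons] at this)
      · intro hab
        exact h 0 ⟨by simp, by simpa using hab.1, by simpa using hab.2⟩

theorem firstRun_some (t : List Int) (j : Nat) (hT : Triple t j) (h : ∀ i, i < j → ¬ Triple t i) :
    firstRun t = some (t.getD j 0) := by
  induction t generalizing j with
  | nil => exact absurd hT.1 (by simp)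
  | cons x xs ih =>
    have hlen : j + 2 < xs.length + 1 := by simpa using hT.1
    match xs with
    | [] => simp at hlen
    | [b] => simp at hlen
    | b :: c :: rest =>
      cases j with
      | zero =>
        have h1 : x = b := by simpa using hT.2.1
        have h2 : b = c := by simpa using hT.2.2
        rw [firstRun, if_pos ⟨h1, h2⟩]
        simp
      | succ n =>
        have h0 : ¬ (x = b ∧ b = c) := by
          intro hab
          exact h 0 (Nat.succ_pos n) ⟨by simp, by simpa using hab.1, by simpa using hab.2⟩
        rw [firstRun, if_neg h0]
        rw [ih n ((triple_cons x _ n).mp hT)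
          (fun i hi => by have := h (i+1) (by omega); rwa [triple_cons] at this)]
        simp

theorem dropThree_zero (v : Int) (t : List Int) : dropThree v 0 t = t := by
  induction t with
  | nil => rfl
  | cons x xs ih => rw [dropThree, if_neg (by simp)]; rw [ih]

theorem dropThree_succ (v : Int) (n : Nat) (t : List Int) (h : v ∈ t) :
    dropThree v (n+1) t = dropThree v n (t.erase v) := by
  induction t with
  | nil => simp at h
  | cons x xs ih =>
    by_cases hx : x = v
    · rw [dropThree, if_pos ⟨Nat.succ_ne_zero n, hx⟩, List.erase_cons,
        if_pos (by simpa using hx)]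
      norm_num
    · have hmem : v ∈ xs := by
        rcases List.mem_cons.mp h with h' | h'
        · exact absurd h'.symm hx
        · exact h'
      rw [dropThree, if_neg (by tauto), List.erase_cons, if_neg (by simpa using hx),
        dropThree, if_neg (by tauto), ih hmem]

-- the first occurrence of v removed: any later position holding v shifts down by one
theorem erase_getD_shift (t : List Int) (v : Int) (a b : Nat) (hab : a < b) (hb : b < t.length)
    (ha : t.getD a 0 = v) (hbv : t.getD b 0 = v) : (t.erase v).getD (b-1) 0 = v := by
  induction t generalizing a b with
  | nil => simp at hb
  | cons x xs ih =>
    by_cases hx : x = v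
    · rw [List.erase_cons, if_pos (by simpa using hx)]
      obtain ⟨b', rfl⟩ : ∃ b', b = b' + 1 := ⟨b - 1, by omega⟩
      simpa using hbv
    · have ha0 : a ≠ 0 := by rintro rfl; exact hx (by simpa using ha)
      obtain ⟨a', rfl⟩ : ∃ a', a = a' + 1 := ⟨a - 1, by omega⟩
      obtain ⟨b', rfl⟩ : ∃ b', b = b' + 1 := ⟨b - 1, by omega⟩
      rw [List.erase_cons, if_neg (by simpa using hx)]
      have hb' : b' ≠ 0 := by omega
      obtain ⟨b'', rfl⟩ : ∃ b'', b' = b'' + 1 := ⟨b' - 1, by omega⟩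
      have := ih a' (b'' + 1) (by omega) (by simpa using hb) (by simpa using ha)
        (by simpa using hbv)
      simpa using this

theorem loopB_none (k : Int) (t : List Int) (h : firstRun t = none) : kotsuLoopB k t = (k, t) := by
  rw [kotsuLoopB]
  split <;> simp_all

theorem loopB_some (k : Int) (t : List Int) (v : Int) (h : firstRun t = some v) :
    kotsuLoopB k t = kotsuLoopB (k+1) (dropThree v 3 t) := by
  rw [kotsuLoopB]
  split <;> simp_all

theorem loopA_eq (tehai : List Int) (k : Int) (j : Nat)
    (h : ∀ i, i < j → ¬ Triple tehai i) :
    kotsuLoopA k j tehai = kotsuLoopB k tehai := by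
  rw [kotsuLoopA]
  by_cases hlen : j + 2 < tehai.length
  · rw [dif_pos hlen]
    by_cases hc : tehai.getD j 0 = tehai.getD (j+1) 0 ∧ tehai.getD (j+1) 0 = tehai.getD (j+2) 0
    · rw [if_pos hc]
      -- the triple at j is the leftmost one
      have hT : Triple tehai j := ⟨hlen, hc⟩
      set v : Int := tehai.getD j 0 with hv
      have hv1 : tehai.getD (j+1) 0 = v := hc.1.symm
      have hv2 : tehai.getD (j+2) 0 = v := by rw [← hc.2, hv1]
      have hFR : firstRun tehai = some v := firstRun_some tehai j hT h
      -- the three removes remove the first three occurrences of v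
      have ht1 : pyRemove tehai (tehai.getD (j+2) 0) = tehai.erase v := by
        rw [hv2, pyRemove_eq_erase]
      have e1j : (tehai.erase v).getD j 0 = v :=
        erase_getD_shift tehai v j (j+1) (by omega) (by omega) rfl hv1
      have e1j1 : (tehai.erase v).getD (j+1) 0 = v := by
        have := erase_getD_shift tehai v j (j+2) (by omega) (by omega) rfl hv2
        simpa using this
      have hmem0 : v ∈ tehai := getD_mem_of_lt tehai j (by omega)
      have hlen1 : (tehai.erase v).length = tehai.length - 1 := List.length_erase_of_mem hmem0
      have hmem1 : v ∈ tehai.erase v := by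
        have := getD_mem_of_lt (tehai.erase v) j (by omega)
        rwa [e1j] at this
      have ht2 : pyRemove (tehai.erase v) ((tehai.erase v).getD (j+1) 0)
          = (tehai.erase v).erase v := by rw [e1j1, pyRemove_eq_erase]
      have hlen2 : ((tehai.erase v).erase v).length = tehai.length - 2 := by
        rw [List.length_erase_of_mem hmem1, hlen1]; omega
      have e2j : ((tehai.erase v).erase v).getD j 0 = v := by
        have := erase_getD_shift (tehai.erase v) v j (j+1) (by omega) (by omega) e1j e1j1
        simpa using this
      have hmem2 : v ∈ (tehai.erase v).erase v := by
        have := getD_mem_of_lt ((tehai.erase v).erase v) j (by omega)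
        rwa [e2j] at this
      have ht3 : pyRemove ((tehai.erase v).erase v) (((tehai.erase v).erase v).getD j 0)
          = ((tehai.erase v).erase v).erase v := by rw [e2j, pyRemove_eq_erase]
      have hdrop : dropThree v 3 tehai = ((tehai.erase v).erase v).erase v := by
        rw [dropThree_succ v 2 tehai hmem0, dropThree_succ v 1 _ hmem1,
          dropThree_succ v 0 _ hmem2, dropThree_zero]
      have hrec : kotsuLoopA (k+1) 0 (((tehai.erase v).erase v).erase v)
          = kotsuLoopB (k+1) (((tehai.erase v).erase v).erase v) :=
        loopA_eq (((tehai.erase v).erase v).erase v) (k+1) 0 (by omega)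
      calc kotsuLoopA (k+1) 0 (pyRemove (pyRemove (pyRemove tehai (tehai.getD (j+2) 0))
              ((pyRemove tehai (tehai.getD (j+2) 0)).getD (j+1) 0))
              ((pyRemove (pyRemove tehai (tehai.getD (j+2) 0))
                ((pyRemove tehai (tehai.getD (j+2) 0)).getD (j+1) 0)).getD j 0))
          = kotsuLoopA (k+1) 0 (((tehai.erase v).erase v).erase v) := by rw [ht1, ht2, ht3]
        _ = kotsuLoopB (k+1) (((tehai.erase v).erase v).erase v) := hrec
        _ = kotsuLoopB (k+1) (dropThree v 3 tehai) := by rw [hdrop]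
        _ = kotsuLoopB k tehai := (loopB_some k tehai v hFR).symm
    · rw [if_neg hc]
      exact loopA_eq tehai k (j+1) (fun i hi => by
        rcases Nat.lt_succ_iff_lt_or_eq.mp hi with h' | h'
        · exact h i h'
        · subst h'; exact fun hT => hc hT.2)
  · rw [dif_neg hlen]
    have : ∀ i, ¬ Triple tehai i := by
      intro i hT
      exact h i (by have := hT.1; omega) hT
    rw [loopB_none k tehai (firstRun_none tehai this)]
termination_by (tehai.length, tehai.length - j)
decreasing_by
  · apply Prod.Lex.left
    rw [List.length_erase_of_mem hmem2, hlen2]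
    omega
  · apply Prod.Lex.right
    omega

-- ===== VERDICT (by name: the statement is the Claim_ definition above) =====
theorem kotsu_cnt_spec : Claim_equal_kotsu_cnt := by
  intro tehai _
  unfold Spec_kotsu_cnt kotsu_cnt kotsu_cnt_alt
  exact loopA_eq tehai 0 0 (by omega)
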